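-- pv_equiv track=rewrite | github.com/alexandraback/datacollection | solutions_5751500831719424_1/Python/AndersTornkvist/a.py | problem_a
-- ===== SOURCE A (Python) =====
-- def problem_a(N, lines):
--     order = []
--     assert(len(lines)>1)
--     last = ''
--     for char in lines[0]:
--         if char!=last:
--             order.append(char)
--             last = char
--     counts = []
--     for line in lines:
--         my_count = []
--         last = ''
--         found = 0
--         for char in line:
--             if char!=last:
--                 if len(order)==found or order[found]!=char:
--                     return 'Fegla Won'
--                 found += 1
--                 last = char
--                 my_count.append(0)
--             else:
--                 my_count[-1] += 1
--         if len(order)!=found: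
--             return 'Fegla Won'
--         counts.append(my_count)
--     total = 0
--     for (inx, char) in enumerate(order):
--         try:
--             current = [x[inx] for x in counts]
--         except IndexError:
--             return 'Fegla Won'
--         lowest = None
--         for a in range(min(current), max(current) + 1):
--             extra = 0
--             for x in current:
--                 extra += abs(x - a)
--             if lowest is None or extra < lowest:
--                 lowest = extra
--         total += lowest
--     return str(total)
-- ===== SOURCE B (Python) =====
-- def problem_a(N, lines):
--     assert len(lines) > 1
--
--     def rle(s):
--         groups = []
--         for ch in s:
--             if groups and groups[-1][0] == ch:
--                 groups[-1][1] += 1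
--             else:
--                 groups.append([ch, 1])
--         return groups
--
--     first = rle(lines[0])
--     pattern = [c for c, _ in first]
--     cols = [[] for _ in pattern]
--     for line in lines:
--         g = rle(line)
--         if [c for c, _ in g] != pattern:
--             return 'Fegla Won'
--         for col, (_, k) in zip(cols, g):
--             col.append(k)
--     total = 0
--     for col in cols:
--         s = sorted(col)
--         n = len(s)
--         total += sum(s[(n + 1) // 2:]) - sum(s[:n // 2])
--     return str(total)
-- ===== Notes on version B (the rewrite author's own statement) =====
-- stated objective: alternative
-- what changed: A checks each line char-by-char with a found/last state machine and, per column, scans every candidate value in [min,max] summing absolute deviations; B run-length-encodes each line, compares run-character patterns wholesale, and computes each column's optimum in closed form as (sum of upper half) - (sum of lower half) of the sorted run lengths, trading the value-range scan for a sort.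
import Mathlib
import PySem

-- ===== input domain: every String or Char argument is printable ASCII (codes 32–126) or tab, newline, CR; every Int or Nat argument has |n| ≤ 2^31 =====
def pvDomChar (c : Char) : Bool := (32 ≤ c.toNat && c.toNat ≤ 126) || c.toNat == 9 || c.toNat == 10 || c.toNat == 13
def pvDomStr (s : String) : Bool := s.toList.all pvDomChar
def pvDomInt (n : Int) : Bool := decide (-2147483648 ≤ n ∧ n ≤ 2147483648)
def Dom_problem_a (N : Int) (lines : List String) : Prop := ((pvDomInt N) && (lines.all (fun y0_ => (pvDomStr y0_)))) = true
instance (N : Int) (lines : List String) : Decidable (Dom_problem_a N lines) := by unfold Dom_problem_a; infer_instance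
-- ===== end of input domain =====

-- B replaces A's per-column scan over the value range [min,max] by sort + (upper-half sum − lower-half sum), the closed-form minimizer of the sum of absolute deviations (an alternative algorithm, not claimed faster); equal return values proved on all inputs with at least two lines.


-- ===== PORT A =====
-- my_count[-1] += 1
def incLast : List Int → List Int
  | [] => []
  | [x] => [x + 1]
  | x :: y :: xs => x :: incLast (y :: xs)

-- first loop of A: order/last over lines[0]
def dedupLoop : List Char → List Char → Option Char → List Char
  | [], order, _ => order
  | ch :: rest, order, last =>
    if some ch ≠ last then dedupLoop rest (order ++ [ch]) (some ch)
    else dedupLoop rest order last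

-- per-line loop of A (state my_count/last/found); none = early 'return Fegla Won'
def aLineLoop (o : List Char) : List Char → List Int → Option Char → Nat → Option (List Int × Nat)
  | [], mc, _, found => some (mc, found)
  | ch :: rest, mc, last, found =>
    if some ch ≠ last then
      (if o.length = found ∨ o[found]? ≠ some ch then none
       else aLineLoop o rest (mc ++ [0]) (some ch) (found + 1))
    else aLineLoop o rest (incLast mc) last found

-- 'for line in lines' loop building counts
def aCounts (o : List Char) : List (List Char) → Option (List (List Int))
  | [] => some []
  | l :: rest =>
    match aLineLoop o l [] none 0 with
    | none => none
    | some (mc, found) =>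
      if o.length ≠ found then none
      else (aCounts o rest).map (mc :: ·)

-- 'for a in range(min(current), max(current)+1)' with the running lowest
def lowestLoop (current : List Int) : List Int → Option Int → Option Int
  | [], lowest => lowest
  | a :: rest, lowest =>
    let extra := current.foldl (fun acc x => acc + |x - a|) 0
    match lowest with
    | none => lowestLoop current rest (some extra)
    | some lo =>
      if extra < lo then lowestLoop current rest (some extra)
      else lowestLoop current rest (some lo)

-- min()/max() of an empty column raise ValueError in Python: unreachable inside Pre_
def colLowest (current : List Int) : Option Int :=
  match PySem.List.min? current (fun x => x), PySem.List.max? current (fun x => x) with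
  | some lo, some hi => lowestLoop current (PySem.List.pyRange lo (hi + 1) 1) none
  | _, _ => none

-- 'for (inx, char) in enumerate(order)' accumulating total; none = 'Fegla Won'
def aTotal (counts : List (List Int)) : List Char → Nat → Int → Option Int
  | [], _, total => some total
  | _ :: rest, inx, total =>
    match counts.mapM (fun x => x[inx]?) with
    | none => none
    | some current =>
      match colLowest current with
      | none => none
      | some lowest => aTotal counts rest (inx + 1) (total + lowest)

def problem_a (N : Int) (lines : List String) : String :=
  if lines.length ≤ 1 then "Fegla Won"   -- assert(len(lines)>1) fails here: outside Pre_, value arbitrary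
  else
    let order := dedupLoop (lines.headD "").toList [] none
    match aCounts order (lines.map String.toList) with
    | none => "Fegla Won"
    | some counts =>
      match aTotal counts order 0 0 with
      | none => "Fegla Won"
      | some total => PySem.Int.toStr total

-- ===== PORT B =====
-- B's rle helper: groups as a reversed accumulator (groups[-1] is the head)
def rleLoop : List Char → List (Char × Int) → List (Char × Int)
  | [], groups => groups.reverse
  | ch :: rest, groups =>
    match groups with
    | (c, k) :: t =>
      if c = ch then rleLoop rest ((c, k + 1) :: t)
      else rleLoop rest ((ch, 1) :: (c, k) :: t)
    | [] => rleLoop rest [(ch, 1)]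

def rle (s : List Char) : List (Char × Int) := rleLoop s []

-- 'for line in lines' appending each run length to its column; none = 'Fegla Won'
def bColsLoop (pattern : List Char) : List (List Char) → List (List Int) → Option (List (List Int))
  | [], cols => some cols
  | l :: rest, cols =>
    let g := rle l
    if g.map Prod.fst ≠ pattern then none
    else bColsLoop pattern rest (List.zipWith (fun col p => col ++ [p.2]) cols g)

-- sum(s[(n+1)//2:]) - sum(s[:n//2]) on s = sorted(col)
def colCost (col : List Int) : Int :=
  let s := PySem.List.sorted col (fun x => x) false
  let n : Int := (s.length : Int)
  (PySem.List.slice s (some (PySem.Int.floordiv (n + 1) 2)) none).sum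
    - (PySem.List.slice s none (some (PySem.Int.floordiv n 2))).sum

def problem_a_alt (N : Int) (lines : List String) : String :=
  if lines.length ≤ 1 then "Fegla Won"   -- assert len(lines) > 1 fails here: outside Pre_, value arbitrary
  else
    let pattern := (rle (lines.headD "").toList).map Prod.fst
    match bColsLoop pattern (lines.map String.toList) (pattern.map (fun _ => ([] : List Int))) with
    | none => "Fegla Won"
    | some cols => PySem.Int.toStr (cols.foldl (fun t col => t + colCost col) 0)

-- ===== PRECONDITION & SPEC =====
-- Pre_ excludes exactly the inputs with fewer than two lines, on which A's 'assert(len(lines)>1)' raises AssertionError (B asserts the same).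
def Pre_problem_a (N : Int) (lines : List String) : Prop := 1 < lines.length
instance (N : Int) (lines : List String) : Decidable (Pre_problem_a N lines) := by unfold Pre_problem_a; infer_instance
def pvWitness_problem_a : Int × List String := (0, ["aab", "ab"])

def Spec_problem_a (N : Int) (lines : List String) (out : String) : Prop := out = problem_a_alt N lines
instance (N : Int) (lines : List String) (out : String) : Decidable (Spec_problem_a N lines out) := by unfold Spec_problem_a; infer_instance

-- ===== CLAIM (what is proved, stated in full; the proofs are below) =====
def Claim_equal_problem_a : Prop := ∀ (N : Int) (lines : List String), Dom_problem_a N lines → Pre_problem_a N lines → Spec_problem_a N lines (problem_a N lines)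

-- ===== LEMMAS AND PROOFS =====

-- canonical run-length encoding (proof-side spec shared by both ports)
def runsFrom (c : Char) (n : Int) : List Char → List (Char × Int)
  | [] => [(c, n)]
  | x :: xs => if x = c then runsFrom c (n + 1) xs else (c, n) :: runsFrom x 1 xs

def runs : List Char → List (Char × Int)
  | [] => []
  | x :: xs => runsFrom x 1 xs

-- the run characters after the current run of c
def runCharsTail (c : Char) : List Char → List Char
  | [] => []
  | x :: xs => if x = c then runCharsTail c xs else x :: runCharsTail x xs

-- closed form of one column's optimal cost on the (not necessarily sorted) list s
def pairCostV (s : List Int) : Int :=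
  (s.drop ((s.length + 1) / 2)).sum - (s.take (s.length / 2)).sum

theorem runsFrom_map_fst (s : List Char) : ∀ c n, (runsFrom c n s).map Prod.fst = c :: runCharsTail c s := by
  induction s with
  | nil => intro c n; simp [runsFrom, runCharsTail]
  | cons x xs ih =>
    intro c n
    by_cases h : x = c
    · simp [runsFrom, runCharsTail, h, ih]
    · simp [runsFrom, runCharsTail, h, ih]

theorem runsFrom_ne_nil (s : List Char) (c : Char) (n : Int) : runsFrom c n s ≠ [] := by
  induction s generalizing c n with
  | nil => simp [runsFrom]
  | cons x xs ih =>
    by_cases h : x = c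
    · simpa [runsFrom, h] using ih c (n + 1)
    · simp [runsFrom, h]

theorem rleLoop_eq (s : List Char) : ∀ c n t, rleLoop s ((c, n) :: t) = t.reverse ++ runsFrom c n s := by
  induction s with
  | nil => intro c n t; simp [rleLoop, runsFrom]
  | cons x xs ih =>
    intro c n t
    by_cases h : c = x
    · subst h; simp [rleLoop, runsFrom, ih]
    · have hx : ¬ x = c := fun hxc => h hxc.symm
      simp [rleLoop, runsFrom, h, hx, ih]

theorem rle_eq (s : List Char) : rle s = runs s := by
  cases s with
  | nil => rfl
  | cons x xs =>
    show rleLoop xs [(x, 1)] = runs (x :: xs)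
    rw [rleLoop_eq]
    simp [runs]

theorem dedupLoop_some (s : List Char) : ∀ acc c, dedupLoop s acc (some c) = acc ++ runCharsTail c s := by
  induction s with
  | nil => intro acc c; simp [dedupLoop, runCharsTail]
  | cons x xs ih =>
    intro acc c
    by_cases h : x = c
    · simp [dedupLoop, runCharsTail, h, ih]
    · simp [dedupLoop, runCharsTail, h, ih]

theorem dedupLoop_eq_runs (s : List Char) : dedupLoop s [] none = (runs s).map Prod.fst := by
  cases s with
  | nil => rfl
  | cons x xs =>
    show dedupLoop xs [x] (some x) = (runs (x :: xs)).map Prod.fst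
    rw [dedupLoop_some, runs, runsFrom_map_fst]
    simp

theorem incLast_append (mc : List Int) (m : Int) : incLast (mc ++ [m]) = mc ++ [m + 1] := by
  induction mc with
  | nil => simp [incLast]
  | cons x mc ih =>
    cases mc with
    | nil => simp [incLast]
    | cons y mc' => simpa [incLast] using ih

theorem aLineLoop_eq (o : List Char) (s : List Char) : ∀ c m mc found,
    aLineLoop o s (mc ++ [m]) (some c) found =
      if (runCharsTail c s).isPrefixOf (o.drop found)
      then some (mc ++ (runsFrom c (m + 1) s).map (fun p => p.2 - 1),
                 found + ((runsFrom c (m + 1) s).length - 1))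
      else none := by
  induction s with
  | nil =>
    intro c m mc found
    simp [aLineLoop, runsFrom, runCharsTail]
  | cons x xs ih =>
    intro c m mc found
    by_cases hx : x = c
    · subst hx
      have h1 : aLineLoop o (x :: xs) (mc ++ [m]) (some x) found
          = aLineLoop o xs (incLast (mc ++ [m])) (some x) found := by
        simp [aLineLoop]
      rw [h1, incLast_append, ih x (m + 1) mc found]
      simp [runsFrom, runCharsTail]
    · have h1 : aLineLoop o (x :: xs) (mc ++ [m]) (some c) found
          = if o.length = found ∨ o[found]? ≠ some x then none
            else aLineLoop o xs ((mc ++ [m]) ++ [0]) (some x) (found + 1) := by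
        simp [aLineLoop, hx]
      have hrt : runCharsTail c (x :: xs) = x :: runCharsTail x xs := by
        simp [runCharsTail, hx]
      have hrf : runsFrom c (m + 1) (x :: xs) = (c, m + 1) :: runsFrom x 1 xs := by
        simp [runsFrom, hx]
      have hlen1 : 1 ≤ (runsFrom x 1 xs).length :=
        List.length_pos_of_ne_nil (runsFrom_ne_nil xs x 1)
      rw [h1, hrt, hrf]
      rcases Nat.lt_or_ge found o.length with hlt | hge
      · have hget : o[found]? = some o[found] := List.getElem?_eq_getElem hlt
        have hdrop : o.drop found = o[found] :: o.drop (found + 1) :=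
          List.drop_eq_getElem_cons hlt
        by_cases hxf : o[found] = x
        · have hcond : ¬ (o.length = found ∨ o[found]? ≠ some x) := by
            simp [hget, hxf]; omega
          rw [if_neg hcond, ih x 0 (mc ++ [m]) (found + 1)]
          rw [hdrop]
          have hbeq : (x == o[found]) = true := by simp [hxf]
          show _ = if ((x == o[found]) && (runCharsTail x xs).isPrefixOf (o.drop (found+1))) = true
            then _ else _
          rw [hbeq, Bool.true_and]
          norm_num
          split_ifs with hp
          · simp only [Option.some.injEq, Prod.mk.injEq]
            constructor
            · simp
            · omega
          · rfl
        · have hcond : o.length = found ∨ o[found]? ≠ some x := by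
            right; simp [hget, hxf]
          rw [if_pos hcond, hdrop]
          have : ((x :: runCharsTail x xs).isPrefixOf (o[found] :: o.drop (found+1))) = false := by
            show ((x == o[found]) && _) = false
            have : (x == o[found]) = false := by
              simp; intro hxx; exact hxf hxx.symm
            rw [this, Bool.false_and]
          rw [this]
          rfl
      · have hdrop : o.drop found = [] := List.drop_eq_nil_of_le hge
        have hcond : o.length = found ∨ o[found]? ≠ some x := by
          right; simp [List.getElem?_eq_none hge]
        rw [if_pos hcond, hdrop]
        rfl

theorem aLine_full (o : List Char) (s : List Char) :
    (match aLineLoop o s [] none 0 with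
     | none => none
     | some (mc, found) => if o.length ≠ found then none else some mc)
    = if (runs s).map Prod.fst = o then some ((runs s).map (fun p => p.2 - 1)) else none := by
  cases s with
  | nil =>
    cases o with
    | nil => simp [aLineLoop, runs]
    | cons y o' => simp [aLineLoop, runs]
  | cons x xs =>
    have h1 : aLineLoop o (x :: xs) [] none 0
        = if o.length = 0 ∨ o[0]? ≠ some x then none
          else aLineLoop o xs [0] (some x) 1 := by
      simp [aLineLoop]
    have h2 := aLineLoop_eq o xs x 0 [] 1
    norm_num at h2
    have hfst : (runs (x :: xs)).map Prod.fst = x :: runCharsTail x xs := runsFrom_map_fst xs x 1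
    have hlen : (runsFrom x 1 xs).length = (runCharsTail x xs).length + 1 := by
      have := congrArg List.length (runsFrom_map_fst xs x 1)
      simpa using this
    cases o with
    | nil =>
      rw [h1]
      simp [hfst]
    | cons y o' =>
      rw [h1]
      by_cases hxy : x = y
      · subst hxy
        have hc : ¬ ((x :: o').length = 0 ∨ (x :: o')[0]? ≠ some x) := by simp
        rw [if_neg hc, h2, hfst]
        simp only [List.tail_cons]
        by_cases hp : runCharsTail x xs <+: o'
        · rw [if_pos hp]
          by_cases hq : runCharsTail x xs = o'
          · have hflen : ¬ ((x :: o').length ≠ 1 + ((runsFrom x 1 xs).length - 1)) := by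
              simp only [List.length_cons, hlen, ← hq]
              omega
            show (if (x :: o').length ≠ 1 + ((runsFrom x 1 xs).length - 1) then none
                  else some ([] ++ (runsFrom x 1 xs).map (fun p => p.2 - 1))) = _
            rw [if_neg hflen, if_pos (by rw [hq])]
            simp [runs]
          · have hflen : (x :: o').length ≠ 1 + ((runsFrom x 1 xs).length - 1) := by
              intro he
              simp only [List.length_cons, hlen] at he
              exact hq (List.IsPrefix.eq_of_length hp (by omega))
            show (if (x :: o').length ≠ 1 + ((runsFrom x 1 xs).length - 1) then none
                  else some ([] ++ (runsFrom x 1 xs).map (fun p => p.2 - 1))) = _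
            rw [if_pos hflen, if_neg (by simp; intro hq'; exact absurd hq' hq)]
        · rw [if_neg hp]
          show none = _
          rw [if_neg (by
            simp only [List.cons.injEq]
            rintro ⟨-, hq⟩
            exact hp (hq ▸ List.prefix_rfl))]
      · rw [if_pos (Or.inr (by simp; exact fun h => hxy h.symm))]
        rw [hfst, if_neg (by simp only [List.cons.injEq]; rintro ⟨hxy', -⟩; exact hxy hxy')]

theorem aCounts_eq (o : List Char) (ls : List (List Char)) :
    aCounts o ls =
      if ∀ l ∈ ls, (runs l).map Prod.fst = o
      then some (ls.map (fun l => (runs l).map (fun p => p.2 - 1)))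
      else none := by
  induction ls with
  | nil => simp [aCounts]
  | cons l rest ih =>
    have hstep : aCounts o (l :: rest)
        = match (match aLineLoop o l [] none 0 with
                 | none => none
                 | some (mc, found) => if o.length ≠ found then none else some mc) with
          | none => none
          | some mc => (aCounts o rest).map (mc :: ·) := by
      rcases h : aLineLoop o l [] none 0 with - | ⟨mc, found⟩
      · simp [aCounts, h]
      · by_cases hf : o.length ≠ found
        · simp [aCounts, h, hf]
        · simp [aCounts, h, hf]
    rw [hstep, aLine_full, ih]
    by_cases hl : (runs l).map Prod.fst = o
    · by_cases hrest : ∀ l' ∈ rest, (runs l').map Prod.fst = o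
      · rw [if_pos hl, if_pos hrest, if_pos (by simpa [hl] using hrest)]
        rfl
      · rw [if_pos hl, if_neg hrest,
            if_neg (by intro hall; exact hrest fun l' hl' => hall l' (List.mem_cons_of_mem _ hl'))]
        rfl
    · have hcond : ¬ ∀ l' ∈ l :: rest, (runs l').map Prod.fst = o := by
        intro hall
        exact hl (hall l (by simp))
      rw [if_neg hl, if_neg hcond]

theorem bColsLoop_eq (pattern : List Char) (ls : List (List Char)) : ∀ cols : List (List Int),
    cols.length = pattern.length →
    bColsLoop pattern ls cols =
      if ∀ l ∈ ls, (runs l).map Prod.fst = pattern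
      then some ((List.range pattern.length).map
                  (fun j => cols.getD j [] ++ ls.map (fun l => ((runs l).map (fun p => p.2)).getD j 0)))
      else none := by
  induction ls with
  | nil =>
    intro cols hlen
    rw [bColsLoop, if_pos (by simp)]
    refine congrArg some (List.ext_getElem (by simp [hlen]) ?_)
    intro j h1 h2
    simp only [List.getElem_map, List.getElem_range, List.map_nil, List.append_nil]
    rw [List.getD_eq_getElem cols [] (by omega)]
  | cons l rest ih =>
    intro cols hlen
    by_cases hl : (runs l).map Prod.fst = pattern
    · have h1 : bColsLoop pattern (l :: rest) cols
          = bColsLoop pattern rest (List.zipWith (fun col p => col ++ [p.2]) cols (rle l)) := by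
        rw [bColsLoop]
        rw [if_neg (by rw [rle_eq]; simp [hl])]
      have hrl : (runs l).length = pattern.length := by
        rw [← hl, List.length_map]
      have hlen2 : (List.zipWith (fun (col : List Int) (p : Char × Int) => col ++ [p.2])
          cols (runs l)).length = pattern.length := by
        simp [List.length_zipWith, hlen, hrl]
      rw [h1, rle_eq, ih _ hlen2]
      by_cases hrest : ∀ l' ∈ rest, (runs l').map Prod.fst = pattern
      · rw [if_pos hrest, if_pos (by
          intro l' hl'
          rcases List.mem_cons.mp hl' with h | h
          · rw [h]; exact hl
          · exact hrest l' h)]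
        refine congrArg some (List.map_congr_left ?_)
        intro j hj
        have hjK : j < pattern.length := List.mem_range.mp hj
        have e1 : (List.zipWith (fun (col : List Int) (p : Char × Int) => col ++ [p.2])
            cols (runs l)).getD j []
            = cols.getD j [] ++ [((runs l).map (fun p => p.2)).getD j 0] := by
          rw [List.getD_eq_getElem _ _ (by rw [hlen2]; omega)]
          rw [List.getElem_zipWith]
          rw [List.getD_eq_getElem cols [] (by omega),
              List.getD_eq_getElem _ _ (by rw [List.length_map]; omega)]
          simp
        rw [e1]
        simp
      · rw [if_neg hrest, if_neg (by
          intro hall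
          exact hrest fun l' hl' => hall l' (List.mem_cons_of_mem _ hl'))]
    · have hcond : ¬ ∀ l' ∈ l :: rest, (runs l').map Prod.fst = pattern := by
        intro hall
        exact hl (hall l (by simp))
      rw [bColsLoop, if_pos (by rw [rle_eq]; simp [hl]), if_neg hcond]

theorem mapM_getElem (rows : List (List Int)) (inx : Nat)
    (h : ∀ r ∈ rows, inx < r.length) :
    rows.mapM (fun x => x[inx]?) = some (rows.map (fun x => x.getD inx 0)) := by
  induction rows with
  | nil => simp
  | cons r rows ih =>
    have hr : inx < r.length := h r (by simp)
    rw [List.mapM_cons, List.getElem?_eq_getElem hr, ih (fun r hr => h r (by simp [hr]))]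
    simp [List.getD, List.getElem?_eq_getElem hr]

-- pairCostV of a::m++[b]
theorem pairCostV_ends (m : List Int) (a b : Int) :
    pairCostV (a :: (m ++ [b])) = (b - a) + pairCostV m := by
  unfold pairCostV
  have hlen : (a :: (m ++ [b])).length = m.length + 2 := by simp
  rw [hlen]
  have h1 : (m.length + 2 + 1) / 2 = (m.length + 1) / 2 + 1 := by omega
  have h2 : (m.length + 2) / 2 = m.length / 2 + 1 := by omega
  rw [h1, h2]
  simp only [List.drop_succ_cons, List.take_succ_cons]
  rw [List.drop_append_of_le_length (by omega), List.take_append_of_le_length (by omega)]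
  simp [List.sum_append]
  ring

-- lower bound: pairCostV s ≤ Σ |x - a| over s, for every a (no sortedness needed)
theorem pairCostV_le (s : List Int) (a : Int) :
    pairCostV s ≤ (s.map (fun x => |x - a|)).sum := by
  induction s using List.bidirectionalRec with
  | nil => simp [pairCostV]
  | singleton x => simpa [pairCostV] using abs_nonneg (x - a)
  | cons_append x m y ih =>
    rw [pairCostV_ends]
    have h1 : y - a ≤ |y - a| := le_abs_self _
    have h2 : a - x ≤ |x - a| := by rw [abs_sub_comm]; exact le_abs_self _
    simp only [List.map_cons, List.map_append, List.sum_cons, List.sum_append, List.map_nil,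
      List.sum_nil]
    linarith [ih]

-- the median attains pairCostV on a sorted list
theorem pairCostV_median (s : List Int) (hs : s.Pairwise (· ≤ ·)) (hne : s ≠ []) :
    (s.map (fun x => |x - s.getD (s.length / 2) 0|)).sum = pairCostV s := by
  induction s using List.bidirectionalRec with
  | nil => exact absurd rfl hne
  | singleton x => simp [pairCostV]
  | cons_append a m b ih =>
    have hlen : (a :: (m ++ [b])).length = m.length + 2 := by simp
    have hidx : (m.length + 2) / 2 = m.length / 2 + 1 := by omega
    rcases List.pairwise_cons.mp hs with ⟨ha, htl⟩
    rcases List.pairwise_append.mp htl with ⟨hm, _, hcross⟩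
    rw [hlen, hidx]
    simp only [List.getD_cons_succ]
    cases m with
    | nil =>
      have hab : a ≤ b := ha b (by simp)
      have h1 : |a - b| = b - a := by rw [abs_sub_comm]; exact abs_of_nonneg (by omega)
      have h2 : pairCostV (a :: ([] ++ [b])) = (b - a) + pairCostV [] := pairCostV_ends [] a b
      simp only [List.nil_append] at h2 ⊢
      simp [pairCostV, h1]
    | cons m0 m' =>
      set m := m0 :: m' with hmdef
      have hlt : m.length / 2 < m.length := by simp [hmdef]; omega
      have hgd : (m ++ [b]).getD (m.length / 2) 0 = m.getD (m.length / 2) 0 :=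
        List.getD_append _ _ _ _ hlt
      set med := m.getD (m.length / 2) 0 with hmeddef
      have hmem : med ∈ m := by
        rw [hmeddef, List.getD_eq_getElem m 0 hlt]; exact List.getElem_mem hlt
      have ham : a ≤ med := ha med (List.mem_append_left _ hmem)
      have hmb : med ≤ b := hcross med hmem b (by simp)
      have hsum := ih hm (by simp [hmdef])
      rw [hgd]
      simp only [List.map_cons, List.map_append, List.sum_cons, List.sum_append,
        List.map_cons, List.sum_cons, List.map_nil, List.sum_nil]
      have e1 : |a - med| = med - a := by rw [abs_sub_comm]; exact abs_of_nonneg (by omega)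
      have e2 : |b - med| = b - med := abs_of_nonneg (by omega)
      rw [pairCostV_ends, e1, e2, ← hmeddef] at *
      linarith [hsum]

theorem lowestLoop_some (cur : List Int) : ∀ (as : List Int) (v : Int),
    lowestLoop cur as (some v) =
      some ((as.map (fun a => (cur.map (fun x => |x - a|)).sum)).foldl min v) := by
  intro as
  induction as with
  | nil => intro v; simp [lowestLoop]
  | cons a rest ih =>
    intro v
    have hextra : List.foldl (fun acc x => acc + |x - a|) 0 cur
        = (cur.map (fun x => |x - a|)).sum := by
      rw [PySem.List.foldl_add]; ring
    show (if List.foldl (fun acc x => acc + |x - a|) 0 cur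
            < v then _ else _) = _
    rw [hextra]
    simp only [List.map_cons, List.foldl_cons]
    split_ifs with h
    · rw [ih, min_eq_right (le_of_lt h)]
    · rw [ih, min_eq_left (le_of_not_gt h)]

-- THE core fact: A's scan over [min,max] returns pairCostV of the sorted column
theorem colLowest_eq (cur : List Int) (hne : cur ≠ []) :
    colLowest cur = some (pairCostV (PySem.List.sorted cur (fun x => x) false)) := by
  obtain ⟨lo, hlo⟩ : ∃ lo, PySem.List.min? cur (fun x => x) = some lo := by
    cases h : PySem.List.min? cur (fun x => x) with
    | none => exact absurd ((PySem.List.min?_eq_none_iff _ _).mp h) hne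
    | some lo => exact ⟨lo, rfl⟩
  obtain ⟨hi, hhi⟩ : ∃ hi, PySem.List.max? cur (fun x => x) = some hi := by
    cases h : PySem.List.max? cur (fun x => x) with
    | none => exact absurd ((PySem.List.max?_eq_none_iff _ _).mp h) hne
    | some hi => exact ⟨hi, rfl⟩
  have hlomem : lo ∈ cur := PySem.List.min?_mem hlo
  have hlomin := PySem.List.min?_isMin hlo
  have hhimax := PySem.List.max?_isMax hhi
  have hlohi : lo ≤ hi := hhimax lo hlomem
  set s := PySem.List.sorted cur (fun x => x) false with hsdef
  have hsperm : s.Perm cur := PySem.List.sorted_perm _ _ _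
  have hsne : s ≠ [] := by
    intro h
    exact hne ((PySem.List.sorted_eq_nil_iff cur (fun x => x) false).mp h)
  have hspw : s.Pairwise (· ≤ ·) := PySem.List.sorted_pairwise _ _
  have hf : ∀ a : Int, (cur.map (fun x => |x - a|)).sum = (s.map (fun x => |x - a|)).sum :=
    fun a => ((hsperm.map _).sum_eq).symm
  have hslt : s.length / 2 < s.length := by
    have h0 : s.length ≠ 0 := fun h => hsne (List.length_eq_zero_iff.mp h)
    omega
  set med := s.getD (s.length / 2) 0 with hmeddef
  have hmedmem : med ∈ cur := hsperm.mem_iff.mp (by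
    rw [hmeddef, List.getD_eq_getElem s 0 hslt]
    exact List.getElem_mem hslt)
  have hmedcost : (cur.map (fun x => |x - med|)).sum = pairCostV s := by
    rw [hf]
    exact pairCostV_median s hspw hsne
  have hlow : ∀ a : Int, pairCostV s ≤ (cur.map (fun x => |x - a|)).sum := by
    intro a
    rw [hf]
    exact pairCostV_le s a
  unfold colLowest
  rw [hlo, hhi]
  dsimp only
  have hcons : PySem.List.pyRange lo (hi + 1) 1 = lo :: PySem.List.pyRange (lo + 1) (hi + 1) 1 :=
    PySem.List.pyRange_one_cons (by omega)
  rw [hcons]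
  have hstep : lowestLoop cur (lo :: PySem.List.pyRange (lo + 1) (hi + 1) 1) none
      = lowestLoop cur (PySem.List.pyRange (lo + 1) (hi + 1) 1)
          (some (List.foldl (fun acc x => acc + |x - lo|) 0 cur)) := rfl
  rw [hstep, PySem.List.foldl_add, zero_add, lowestLoop_some]
  set f : Int → Int := fun a => (cur.map (fun x => |x - a|)).sum with hfdef
  set rest := PySem.List.pyRange (lo + 1) (hi + 1) 1 with hrest
  congr 1
  -- V := foldl min (f lo) (rest.map f)
  have hminle := PySem.List.foldl_min_le (rest.map f) (f lo)
  have hminmem := PySem.List.foldl_min_mem (rest.map f) (f lo)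
  set V := List.foldl min (f lo) (rest.map f) with hV
  have hVlow : pairCostV s ≤ V := by
    rcases hminmem with h | h
    · rw [h]; exact hlow lo
    · obtain ⟨a, -, ha⟩ := List.mem_map.mp h
      rw [← ha]
      exact hlow a
  have hVhigh : V ≤ pairCostV s := by
    have hmedrange : med ∈ lo :: rest := by
      rw [hrest, ← hcons]
      exact PySem.List.mem_pyRange_one.mpr ⟨hlomin med hmedmem, by have := hhimax med hmedmem; omega⟩
    rcases List.mem_cons.mp hmedrange with h | h
    · calc V ≤ f lo := hminle.1
        _ = pairCostV s := by rw [← h]; exact hmedcost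
    · calc V ≤ f med := hminle.2 (f med) (List.mem_map_of_mem h)
        _ = pairCostV s := hmedcost
  omega

theorem sorted_map_sub_one (c : List Int) :
    PySem.List.sorted (c.map (fun x => x - 1)) (fun x => x) false
      = (PySem.List.sorted c (fun x => x) false).map (fun x => x - 1) := by
  apply PySem.List.eq_of_perm_of_pairwise_le_of_injective (fun x : Int => x)
    (fun a b h => h)
  · exact (PySem.List.sorted_perm _ _ _).trans
      (((PySem.List.sorted_perm c (fun x => x) false).map _).symm)
  · exact PySem.List.sorted_pairwise _ _
  · exact List.pairwise_map.mpr
      ((PySem.List.sorted_pairwise c (fun x => x)).imp (fun h => by omega))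

theorem sum_map_sub_one (l : List Int) : (l.map (fun x => x - 1)).sum = l.sum - l.length := by
  induction l with
  | nil => simp
  | cons x l ih => simp [ih]; ring

theorem pairCostV_map_sub_one (s : List Int) :
    pairCostV (s.map (fun x => x - 1)) = pairCostV s := by
  unfold pairCostV
  rw [List.length_map, ← List.map_drop, ← List.map_take, sum_map_sub_one, sum_map_sub_one]
  simp only [List.length_drop, List.length_take]
  push_cast
  omega

theorem colCost_eq (col : List Int) :
    colCost col = pairCostV (PySem.List.sorted col (fun x => x) false) := by
  unfold colCost pairCostV
  dsimp only
  set s := PySem.List.sorted col (fun x => x) false with hs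
  have h1 : PySem.Int.floordiv ((s.length : Int) + 1) 2 = (((s.length + 1) / 2 : Nat) : Int) := by
    exact_mod_cast PySem.Int.floordiv_natCast (s.length + 1) 2
  have h2 : PySem.Int.floordiv ((s.length : Int)) 2 = ((s.length / 2 : Nat) : Int) := by
    exact_mod_cast PySem.Int.floordiv_natCast s.length 2
  rw [h1, h2, PySem.List.slice_from_natCast, PySem.List.slice_to_natCast]

-- A's total loop as a sum of per-column optima
def colSumSpec (counts : List (List Int)) : List Char → Nat → Int
  | [], _ => 0
  | _ :: rest, inx =>
    pairCostV (PySem.List.sorted (counts.map (fun r => r.getD inx 0)) (fun x => x) false)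
      + colSumSpec counts rest (inx + 1)

theorem aTotal_eq (counts : List (List Int)) (K : Nat)
    (hK : ∀ r ∈ counts, r.length = K) (hne : counts ≠ []) :
    ∀ (osuf : List Char) (inx : Nat) (total : Int), inx + osuf.length = K →
      aTotal counts osuf inx total = some (total + colSumSpec counts osuf inx) := by
  intro osuf
  induction osuf with
  | nil =>
    intro inx total h
    simp [aTotal, colSumSpec]
  | cons ch rest ih =>
    intro inx total h
    have hinx : inx < K := by simp at h; omega
    have hmapM := mapM_getElem counts inx (fun r hr => by rw [hK r hr]; exact hinx)
    have hcur_ne : counts.map (fun r => r.getD inx 0) ≠ [] := by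
      simpa using hne
    have h1 : aTotal counts (ch :: rest) inx total
        = aTotal counts rest (inx + 1)
            (total + pairCostV (PySem.List.sorted (counts.map (fun r => r.getD inx 0))
              (fun x => x) false)) := by
      rw [aTotal, hmapM]
      dsimp only
      rw [colLowest_eq _ hcur_ne]
    rw [h1, ih (inx + 1) _ (by simp at h ⊢; omega), colSumSpec]
    exact congrArg some (by ring)

theorem colSumSpec_eq_sum (counts : List (List Int)) (K : Nat) (g : Nat → Int)
    (hpt : ∀ j, j < K →
      pairCostV (PySem.List.sorted (counts.map (fun r => r.getD j 0)) (fun x => x) false) = g j) :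
    ∀ (osuf : List Char) (inx : Nat), inx + osuf.length = K →
      colSumSpec counts osuf inx = ((List.range osuf.length).map (fun i => g (inx + i))).sum := by
  intro osuf
  induction osuf with
  | nil => intro inx h; simp [colSumSpec]
  | cons ch rest ih =>
    intro inx h
    rw [colSumSpec, hpt inx (by simp at h; omega), ih (inx + 1) (by simp at h ⊢; omega)]
    simp only [List.length_cons]
    rw [List.range_succ_eq_map]
    simp only [List.map_cons, List.map_map, List.sum_cons, Nat.add_zero]
    congr 1
    apply congrArg List.sum
    apply List.map_congr_left
    intro i _
    simp [Function.comp]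
    congr 1
    omega

set_option maxHeartbeats 1600000 in
theorem problem_a_eq (N : Int) (lines : List String) (h : 1 < lines.length) :
    problem_a N lines = problem_a_alt N lines := by
  have hnle : ¬ lines.length ≤ 1 := by omega
  unfold problem_a problem_a_alt
  rw [if_neg hnle, if_neg hnle]
  dsimp only
  have horder : dedupLoop (lines.headD "").toList [] none
      = (runs (lines.headD "").toList).map Prod.fst := dedupLoop_eq_runs _
  have hpatB : (rle (lines.headD "").toList).map Prod.fst
      = (runs (lines.headD "").toList).map Prod.fst := by rw [rle_eq]
  set pat := (runs (lines.headD "").toList).map Prod.fst with hpat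
  set ls := lines.map String.toList with hls
  set K := pat.length with hKdef
  rw [horder, hpatB, aCounts_eq, bColsLoop_eq pat ls _ (by simp)]
  by_cases hok : ∀ l ∈ ls, (runs l).map Prod.fst = pat
  · rw [if_pos hok, if_pos hok]
    dsimp only
    set counts := ls.map (fun l => (runs l).map (fun p => p.2 - 1)) with hcounts
    clear_value counts K ls pat
    have hrunlen : ∀ l ∈ ls, (runs l).length = K := by
      intro l hl
      have h1 : ((runs l).map Prod.fst).length = K := by rw [hok l hl, hKdef]
      simpa using h1
    have hrowlen : ∀ r ∈ counts, r.length = K := by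
      intro r hr
      rw [hcounts] at hr
      obtain ⟨l, hl, rfl⟩ := List.mem_map.mp hr
      simpa using hrunlen l hl
    have hlsne : ls ≠ [] := by
      rw [hls]
      intro hnil
      simp at hnil
      rw [hnil] at h
      simp at h
    have hcne : counts ≠ [] := by
      rw [hcounts]
      simpa using hlsne
    rw [aTotal_eq counts K hrowlen hcne pat 0 0 (by simp [hKdef])]
    dsimp only
    congr 1
    -- pointwise column equality
    have hpt : ∀ j, j < K →
        pairCostV (PySem.List.sorted (counts.map (fun r => r.getD j 0)) (fun x => x) false)
          = colCost (ls.map (fun l => ((runs l).map (fun p => p.2)).getD j 0)) := by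
      intro j hj
      have hcol : counts.map (fun r => r.getD j 0)
          = (ls.map (fun l => ((runs l).map (fun p => p.2)).getD j 0)).map (fun x => x - 1) := by
        rw [hcounts, List.map_map, List.map_map]
        apply List.map_congr_left
        intro l hl
        have hjl : j < (runs l).length := by rw [hrunlen l hl]; omega
        simp only [Function.comp]
        rw [List.getD_eq_getElem _ _ (by simpa using hjl),
            List.getD_eq_getElem _ _ (by simpa using hjl)]
        simp
      rw [hcol, sorted_map_sub_one, pairCostV_map_sub_one, colCost_eq]
    rw [colSumSpec_eq_sum counts K
        (fun j => colCost (ls.map (fun l => ((runs l).map (fun p => p.2)).getD j 0)))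
        hpt pat 0 (by simp [hKdef])]
    rw [PySem.List.foldl_add]
    rw [List.map_map]
    have hcols0 : ∀ j, j < pat.length →
        (pat.map (fun _ => ([] : List Int))).getD j [] = ([] : List Int) := by
      intro j hj
      rw [List.getD_eq_getElem _ _ (by simpa using hj)]
      simp
    refine congrArg (fun z => 0 + z) ?_
    apply congrArg List.sum
    apply List.map_congr_left
    intro i hi
    have hiK : i < pat.length := List.mem_range.mp hi
    simp only [Function.comp, zero_add, hcols0 i hiK, List.nil_append]
  · rw [if_neg hok, if_neg hok]

-- ===== VERDICT (by name: the statement is the Claim_ definition above) =====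
theorem problem_a_spec : Claim_equal_problem_a := by
  intro N lines _ hpre
  unfold Spec_problem_a
  exact problem_a_eq N lines hpre
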